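-- pv_equiv track=rewrite | github.com/ArthurImmich/BERTTextClassifier | bert.py | fetchEquals
-- ===== SOURCE A (Python) =====
-- def fetchEquals(x, y, n, s):
--     new_x = []
--     new_y = []
--     new_x_helper = []
--     new_y_helper = []
--     for j in range(n):
--         new_x_helper.clear()
--         new_y_helper.clear()
--         for i in range(len(x)):
--             if y[i] == j:
--                 new_x_helper.append(x[i])
--                 new_y_helper.append(y[i])
--         new_x.extend(new_x_helper[:s])
--         new_y.extend(new_y_helper[:s])
--     return new_x, new_y
-- ===== SOURCE B (Python) =====
-- def fetchEquals(x, y, n, s):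
--     # Single pass: bucket each x-sample under its label, then emit buckets
--     # for labels 0..n-1, capped with the same [:s] slice A uses.
--     buckets = {}
--     for yi, xi in zip(y, x):
--         buckets.setdefault(yi, []).append(xi)
--     new_x = []
--     new_y = []
--     for j in range(n):
--         vals = buckets.get(j, [])[:s]
--         new_x += vals
--         new_y += [j] * len(vals)
--     return new_x, new_y
-- ===== Notes on version B (the rewrite author's own statement) =====
-- stated objective: faster
-- what changed: Replaces the per-class rescan of the whole sample list (one filtering pass over x for every class j) by a single bucketing pass over zip(y, x) into a dict keyed by label, then emits bucket[j][:s] for j in range(n); new_y is rebuilt as [j]*len(vals) since every matched label equals j.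
import Mathlib
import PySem

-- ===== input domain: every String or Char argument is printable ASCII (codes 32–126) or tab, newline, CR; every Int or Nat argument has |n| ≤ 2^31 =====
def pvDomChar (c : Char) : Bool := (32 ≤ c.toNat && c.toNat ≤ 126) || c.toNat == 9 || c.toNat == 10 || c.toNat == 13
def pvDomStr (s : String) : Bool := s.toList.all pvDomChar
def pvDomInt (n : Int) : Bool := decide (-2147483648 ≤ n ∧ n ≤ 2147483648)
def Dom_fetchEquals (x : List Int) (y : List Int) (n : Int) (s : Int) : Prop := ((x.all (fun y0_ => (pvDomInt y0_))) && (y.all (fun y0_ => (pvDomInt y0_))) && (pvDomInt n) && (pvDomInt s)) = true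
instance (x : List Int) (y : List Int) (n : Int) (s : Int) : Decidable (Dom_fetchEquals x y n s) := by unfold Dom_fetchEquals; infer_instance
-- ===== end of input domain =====

-- B replaces A's per-class rescan of x by one bucketing pass over zip(y, x)
-- into a dict keyed by label, then emits bucket[j][:s] per class (faster per
-- a timing run's measurement at the largest size).

-- ===== PORT A =====
def fetchEquals (x : List Int) (y : List Int) (n : Int) (s : Int) : List Int × List Int :=
  (PySem.List.pyRange 0 n 1).foldl
    (fun (acc : List Int × List Int) j =>
      -- inner loop: rebuild the helper lists for class j
      let helper :=
        (PySem.List.pyRange 0 (x.length : Int) 1).foldl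
          (fun (h : List Int × List Int) i =>
            if PySem.List.pyGetD y i 0 == j then
              (h.1 ++ [PySem.List.pyGetD x i 0], h.2 ++ [PySem.List.pyGetD y i 0])
            else h)
          ([], [])
      (acc.1 ++ PySem.List.slice helper.1 none (some s),
       acc.2 ++ PySem.List.slice helper.2 none (some s)))
    ([], [])

-- ===== PORT B =====
def fetchEquals_alt (x : List Int) (y : List Int) (n : Int) (s : Int) : List Int × List Int :=
  let buckets : PySem.Dict Int (List Int) :=
    (y.zip x).foldl (fun d p => d.modify p.1 [] (· ++ [p.2])) PySem.Dict.empty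
  (PySem.List.pyRange 0 n 1).foldl
    (fun (acc : List Int × List Int) j =>
      let vals := PySem.List.slice (buckets.getD j []) none (some s)
      (acc.1 ++ vals, acc.2 ++ List.replicate vals.length j))
    ([], [])

-- ===== PRECONDITION & SPEC =====
-- Pre_ excludes exactly the inputs on which A raises IndexError at y[i]:
-- those with len(y) < len(x) whose outer loop runs at all (n ≥ 1).
def Pre_fetchEquals (x : List Int) (y : List Int) (n : Int) (s : Int) : Prop :=
  x.length ≤ y.length ∨ n ≤ 0
instance (x : List Int) (y : List Int) (n : Int) (s : Int) : Decidable (Pre_fetchEquals x y n s) := by unfold Pre_fetchEquals; infer_instance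
def pvWitness_fetchEquals : List Int × List Int × Int × Int := ([1, 2, 0, 1], [0, 1, 0, 1], 2, 1)

def Spec_fetchEquals (x : List Int) (y : List Int) (n : Int) (s : Int) (out : List Int × List Int) : Prop := out = fetchEquals_alt x y n s
instance (x : List Int) (y : List Int) (n : Int) (s : Int) (out : List Int × List Int) : Decidable (Spec_fetchEquals x y n s out) := by unfold Spec_fetchEquals; infer_instance

-- ===== CLAIM (what is proved, stated in full; the proofs are below) =====
def Claim_equal_fetchEquals : Prop := ∀ (x : List Int) (y : List Int) (n : Int) (s : Int), Dom_fetchEquals x y n s → Pre_fetchEquals x y n s → Spec_fetchEquals x y n s (fetchEquals x y n s)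

-- ===== LEMMAS AND PROOFS =====

-- the samples of class j, in order: what both A's helper and B's bucket hold
def mlist (x y : List Int) (j : Int) : List Int :=
  ((y.zip x).filter (fun p => p.1 == j)).map (·.2)

lemma slice_to_take {α : Type} (xs : List α) (b : Int) :
    PySem.List.slice xs none (some b) = xs.take (PySem.List.clampIdx xs.length b) := by
  simp [PySem.List.slice, PySem.List.clampIdx]

lemma range_filter_map (x y : List Int) (h : x.length ≤ y.length) (j : Int) :
    ((List.range x.length).filter (fun i => y.getD i 0 == j)).map (fun i => x.getD i 0)
      = mlist x y j := by
  induction x generalizing y with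
  | nil => simp [mlist]
  | cons a x' ih =>
    cases y with
    | nil => simp at h
    | cons b y' =>
      have h' : x'.length ≤ y'.length := by simpa using h
      simp only [mlist, List.length_cons, List.range_succ_eq_map, List.filter_cons,
        List.getD_cons_zero, List.filter_map, List.zip_cons_cons]
      by_cases hb : b = j
      · simp only [hb, beq_self_eq_true, if_true, List.map_cons, List.getD_cons_zero]
        have := ih y' h'
        simp only [mlist] at this
        simp only [Function.comp_def]
        simpa [List.getD_eq_getElem?_getD] using this
      · have hb' : (b == j) = false := by simp [hb]
        have := ih y' h'
        simp only [mlist] at this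
        simp only [hb', Function.comp_def]
        simpa [List.getD_eq_getElem?_getD] using this

lemma helper_eq (x y : List Int) (h : x.length ≤ y.length) (j : Int) :
    (PySem.List.pyRange 0 (x.length : Int) 1).foldl
      (fun (h : List Int × List Int) i =>
        if PySem.List.pyGetD y i 0 == j then
          (h.1 ++ [PySem.List.pyGetD x i 0], h.2 ++ [PySem.List.pyGetD y i 0])
        else h)
      ([], [])
      = (mlist x y j, List.replicate (mlist x y j).length j) := by
  have hstep : (fun (h : List Int × List Int) (i : Int) =>
      if PySem.List.pyGetD y i 0 == j then
        (h.1 ++ [PySem.List.pyGetD x i 0], h.2 ++ [PySem.List.pyGetD y i 0])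
      else h)
    = (fun (h : List Int × List Int) (i : Int) =>
      ((fun (l : List Int) (i : Int) => if PySem.List.pyGetD y i 0 == j then l ++ [PySem.List.pyGetD x i 0] else l) h.1 i,
       (fun (l : List Int) (i : Int) => if PySem.List.pyGetD y i 0 == j then l ++ [PySem.List.pyGetD y i 0] else l) h.2 i)) := by
    funext h i; by_cases hc : PySem.List.pyGetD y i 0 == j <;> simp [hc]
  rw [hstep, PySem.List.foldl_prod_mk
        (f := fun (l : List Int) (i : Int) => if PySem.List.pyGetD y i 0 == j then l ++ [PySem.List.pyGetD x i 0] else l)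
        (g := fun (l : List Int) (i : Int) => if PySem.List.pyGetD y i 0 == j then l ++ [PySem.List.pyGetD y i 0] else l),
      PySem.List.pyRange_zero_natCast, List.foldl_map, List.foldl_map]
  have e1 : (List.range x.length).foldl
      (fun (l : List Int) (k : Nat) => if PySem.List.pyGetD y (k : Int) 0 == j then l ++ [PySem.List.pyGetD x (k : Int) 0] else l) []
      = mlist x y j := by
    simp only [PySem.List.pyGetD_natCast]
    rw [PySem.List.foldl_append_if (p := fun k : Nat => y.getD k 0 == j)
        (f := fun k : Nat => x.getD k 0)]
    · simpa using range_filter_map x y h j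
  have e2 : (List.range x.length).foldl
      (fun (l : List Int) (k : Nat) => if PySem.List.pyGetD y (k : Int) 0 == j then l ++ [PySem.List.pyGetD y (k : Int) 0] else l) []
      = List.replicate (mlist x y j).length j := by
    simp only [PySem.List.pyGetD_natCast]
    rw [PySem.List.foldl_append_if (p := fun k : Nat => y.getD k 0 == j)
        (f := fun k : Nat => y.getD k 0)]
    rw [List.eq_replicate_iff]
    constructor
    · have := congrArg List.length (range_filter_map x y h j)
      simpa using this
    · intro b hb
      rcases List.mem_map.mp hb with ⟨i, hi, rfl⟩
      exact eq_of_beq (List.mem_filter.mp hi).2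
  simp only [PySem.List.pyGetD_natCast] at e1 e2 ⊢
  rw [e1, e2]

lemma bucket_eq (x y : List Int) (j : Int) :
    ((y.zip x).foldl (fun (d : PySem.Dict Int (List Int)) p => d.modify p.1 [] (· ++ [p.2]))
        PySem.Dict.empty).getD j [] = mlist x y j := by
  rw [PySem.Dict.getD_foldl_modify_append]
  simp [mlist, PySem.Dict.getD_empty]

-- ===== VERDICT (by name: the statement is the Claim_ definition above) =====
theorem fetchEquals_spec : Claim_equal_fetchEquals := by
  intro x y n s _ hpre
  show fetchEquals x y n s = fetchEquals_alt x y n s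
  unfold fetchEquals fetchEquals_alt
  rcases hpre with hpre | hn
  · apply PySem.List.foldl_congr_mem
    intro acc j _
    simp only [helper_eq x y hpre j, bucket_eq x y j, slice_to_take,
      List.length_replicate, List.take_replicate, List.length_take]
  · rw [PySem.List.pyRange_one_eq_nil hn]; rfl
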